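-- pv_equiv track=rewrite | github.com/holunda-io/bpm-ai | bpm-ai/bpm_ai/extract/extract.py | filter_and_join
-- ===== SOURCE A (Python) =====
-- def filter_and_join(tags, tags_to_join=['NOUN', 'PROPN', 'NUM', 'SYM', 'X']):
--     result = []
--     current_word = ""
--     prev_tag = None
--
--     for token, tag in tags:
--         if tag in tags_to_join:
--             if prev_tag not in tags_to_join and current_word:
--                 result.append(current_word.strip())
--                 current_word = ""
--             current_word += token
--         else:
--             if current_word:
--                 result.append(current_word.strip())
--                 current_word = ""
--         prev_tag = tag
--
--     if current_word:
--         result.append(current_word.strip())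
--     return result
-- ===== SOURCE B (Python) =====
-- def filter_and_join(tags, tags_to_join=['NOUN', 'PROPN', 'NUM', 'SYM', 'X']):
--     result = []
--     i, n = 0, len(tags)
--     while i < n:
--         if tags[i][1] in tags_to_join:
--             word = ""
--             while i < n and tags[i][1] in tags_to_join:
--                 word += tags[i][0]
--                 i += 1
--             if word:
--                 result.append(word.strip())
--         else:
--             i += 1
--     return result
-- ===== Notes on version B (the rewrite author's own statement) =====
-- stated objective: simpler
-- what changed: Replaces A's single pass with flush-state (current_word, prev_tag) by an index loop that extracts each maximal run of whitelisted tokens with an inner while, joining and appending per run, which drops the prev_tag bookkeeping and the dead double-flush branch.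
import Mathlib
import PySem

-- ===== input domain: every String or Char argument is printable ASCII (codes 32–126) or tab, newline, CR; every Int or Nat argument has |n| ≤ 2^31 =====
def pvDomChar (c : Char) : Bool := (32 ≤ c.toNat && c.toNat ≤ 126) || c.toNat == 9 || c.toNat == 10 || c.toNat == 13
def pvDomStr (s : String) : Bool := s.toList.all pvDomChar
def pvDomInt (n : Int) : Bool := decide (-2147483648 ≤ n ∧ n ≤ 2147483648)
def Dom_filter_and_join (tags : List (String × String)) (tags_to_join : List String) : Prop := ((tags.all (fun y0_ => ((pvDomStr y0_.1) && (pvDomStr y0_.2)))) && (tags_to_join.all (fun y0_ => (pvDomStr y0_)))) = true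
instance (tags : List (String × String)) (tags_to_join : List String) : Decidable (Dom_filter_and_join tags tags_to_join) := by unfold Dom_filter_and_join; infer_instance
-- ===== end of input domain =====

-- B replaces A's flush-state single pass (current_word, prev_tag) by an index loop that
-- extracts each maximal whitelisted run with an inner while; equivalent, simpler, same cost.


-- ===== PORT A =====
-- state = (result, current_word, prev_tag); `prev_tag not in tags_to_join` with prev_tag = None is true
def aStep (tags_to_join : List String) (st : List String × String × Option String)
    (p : String × String) : List String × String × Option String :=
  let (result, current_word, prev_tag) := st
  if tags_to_join.contains p.2 then
    let (result, current_word) :=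
      if (match prev_tag with
          | none => true
          | some t => !tags_to_join.contains t) && current_word ≠ "" then
        (result ++ [PySem.Str.strip current_word], "")
      else (result, current_word)
    (result, current_word ++ p.1, some p.2)
  else
    if current_word ≠ "" then (result ++ [PySem.Str.strip current_word], "", some p.2)
    else (result, current_word, some p.2)

def filter_and_join (tags : List (String × String)) (tags_to_join : List String) : List String :=
  let (result, current_word, _) := tags.foldl (aStep tags_to_join) ([], "", none)
  if current_word ≠ "" then result ++ [PySem.Str.strip current_word] else result

-- ===== PORT B =====
-- inner while: consume the maximal run of whitelisted tokens, return the joined word and the rest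
def runCollect (tags_to_join : List String) : List (String × String) → String × List (String × String)
  | [] => ("", [])
  | (tok, tag) :: rest =>
    if tags_to_join.contains tag then
      let (w, r) := runCollect tags_to_join rest
      (tok ++ w, r)
    else ("", (tok, tag) :: rest)

theorem runCollect_len (tags_to_join : List String) :
    ∀ l : List (String × String), (runCollect tags_to_join l).2.length ≤ l.length := by
  intro l
  induction l with
  | nil => simp [runCollect]
  | cons p rest ih =>
    obtain ⟨tok, tag⟩ := p
    simp only [runCollect]
    split
    · simpa using Nat.le_succ_of_le ih
    · simp

def filter_and_join_alt (tags : List (String × String)) (tags_to_join : List String) : List String :=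
  match tags with
  | [] => []
  | (tok, tag) :: rest =>
    if tags_to_join.contains tag then
      let wr := runCollect tags_to_join rest
      let word := tok ++ wr.1
      (if word ≠ "" then [PySem.Str.strip word] else []) ++ filter_and_join_alt wr.2 tags_to_join
    else filter_and_join_alt rest tags_to_join
termination_by tags.length
decreasing_by
  · exact Nat.lt_succ_of_le (by simpa using runCollect_len tags_to_join rest)
  · simp

-- ===== PRECONDITION & SPEC =====
def Spec_filter_and_join (tags : List (String × String)) (tags_to_join : List String) (out : List String) : Prop := out = filter_and_join_alt tags tags_to_join
instance (tags : List (String × String)) (tags_to_join : List String) (out : List String) : Decidable (Spec_filter_and_join tags tags_to_join out) := by unfold Spec_filter_and_join; infer_instance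

-- ===== CLAIM (what is proved, stated in full; the proofs are below) =====
def Claim_equal_filter_and_join : Prop := ∀ (tags : List (String × String)) (tags_to_join : List String), Dom_filter_and_join tags tags_to_join → Spec_filter_and_join tags tags_to_join (filter_and_join tags tags_to_join)

-- ===== LEMMAS AND PROOFS =====

-- reference function: A's behaviour with the state collapsed to the pending word
def gRef (tags_to_join : List String) (cw : String) : List (String × String) → List String
  | [] => if cw ≠ "" then [PySem.Str.strip cw] else []
  | (tok, tag) :: rest =>
    if tags_to_join.contains tag then gRef tags_to_join (cw ++ tok) rest
    else (if cw ≠ "" then [PySem.Str.strip cw] else []) ++ gRef tags_to_join "" rest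

-- invariant: a nonempty pending word implies the previous tag is whitelisted
def WInv (tags_to_join : List String) (cw : String) (pt : Option String) : Prop :=
  cw ≠ "" → ∃ t, pt = some t ∧ tags_to_join.contains t = true

-- A's final flush, written with projections
def finishA (st : List String × String × Option String) : List String :=
  if st.2.1 ≠ "" then st.1 ++ [PySem.Str.strip st.2.1] else st.1

theorem aStep_whitelist (tags_to_join : List String) (res : List String) (cw tok tag : String)
    (pt : Option String) (htag : tags_to_join.contains tag = true)
    (hinv : WInv tags_to_join cw pt) :
    aStep tags_to_join (res, cw, pt) (tok, tag) = (res, cw ++ tok, some tag) := by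
  simp only [aStep]
  rw [if_pos htag]
  by_cases hcw : cw = ""
  · simp [hcw]
  · obtain ⟨t, hpt, ht⟩ := hinv hcw
    subst hpt
    have hm : t ∈ tags_to_join := by simpa using ht
    simp [hm]

theorem aStep_other (tags_to_join : List String) (res : List String) (cw tok tag : String)
    (pt : Option String) (htag : tags_to_join.contains tag = false) :
    aStep tags_to_join (res, cw, pt) (tok, tag) =
      if cw ≠ "" then (res ++ [PySem.Str.strip cw], "", some tag)
      else (res, cw, some tag) := by
  simp only [aStep, htag]
  simp

-- A's fold equals res ++ gRef cw, under the invariant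
theorem foldA_eq_gRef (tags_to_join : List String) :
    ∀ (l : List (String × String)) (res : List String) (cw : String) (pt : Option String),
      WInv tags_to_join cw pt →
      finishA (l.foldl (aStep tags_to_join) (res, cw, pt)) = res ++ gRef tags_to_join cw l := by
  intro l
  induction l with
  | nil =>
    intro res cw pt _
    simp only [List.foldl_nil, gRef, finishA]
    split <;> simp
  | cons p rest ih =>
    intro res cw pt hinv
    obtain ⟨tok, tag⟩ := p
    simp only [List.foldl_cons, gRef]
    by_cases htag : tags_to_join.contains tag = true
    · rw [aStep_whitelist tags_to_join res cw tok tag pt htag hinv, if_pos htag]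
      exact ih res (cw ++ tok) (some tag) (fun _ => ⟨tag, rfl, htag⟩)
    · have htag' : tags_to_join.contains tag = false := Bool.eq_false_iff.mpr htag
      rw [aStep_other tags_to_join res cw tok tag pt htag', if_neg htag]
      by_cases hcw : cw = ""
      · rw [if_neg (by simp [hcw]), if_neg (by simp [hcw])]
        rw [ih res cw (some tag) (by simp [hcw, WInv])]
        simp [hcw]
      · rw [if_pos hcw, if_pos hcw]
        rw [ih (res ++ [PySem.Str.strip cw]) "" (some tag) (by simp [WInv])]
        simp

-- relate gRef within a run to runCollect
theorem gRef_runCollect (tags_to_join : List String) :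
    ∀ (l : List (String × String)) (cw : String),
      gRef tags_to_join cw l =
        (if cw ++ (runCollect tags_to_join l).1 ≠ "" then
            [PySem.Str.strip (cw ++ (runCollect tags_to_join l).1)] else [])
          ++ gRef tags_to_join "" (runCollect tags_to_join l).2 := by
  intro l
  induction l with
  | nil => intro cw; simp [runCollect, gRef]
  | cons p rest ih =>
    intro cw
    obtain ⟨tok, tag⟩ := p
    by_cases htag : tags_to_join.contains tag = true
    · simp only [gRef, runCollect]
      rw [if_pos htag, if_pos htag]
      rw [ih (cw ++ tok)]
      simp [String.append_assoc]
    · simp only [gRef, runCollect]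
      rw [if_neg htag, if_neg htag]
      simp only [gRef]
      rw [if_neg htag]
      simp

-- B equals gRef from the empty pending word
theorem alt_eq_gRef (tags_to_join : List String) :
    ∀ (l : List (String × String)),
      filter_and_join_alt l tags_to_join = gRef tags_to_join "" l := by
  intro l
  have H : ∀ (n : Nat) (l : List (String × String)), l.length ≤ n →
      filter_and_join_alt l tags_to_join = gRef tags_to_join "" l := by
    intro n
    induction n with
    | zero =>
      intro l hl
      have : l = [] := List.length_eq_zero_iff.mp (Nat.le_zero.mp hl)
      subst this
      simp [filter_and_join_alt, gRef]
    | succ n ih =>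
      intro l hl
      match l with
      | [] => simp [filter_and_join_alt, gRef]
      | (tok, tag) :: rest =>
        rw [filter_and_join_alt]
        by_cases htag : tags_to_join.contains tag = true
        · rw [if_pos htag]
          simp only [gRef]
          rw [if_pos htag]
          rw [show ("" : String) ++ tok = tok by simp]
          rw [gRef_runCollect tags_to_join rest tok]
          have hlen := runCollect_len tags_to_join rest
          have hle : (runCollect tags_to_join rest).2.length ≤ n := by
            simp only [List.length_cons] at hl; omega
          rw [ih _ hle]
        · rw [if_neg htag]
          simp only [gRef]
          rw [if_neg htag]
          have hle : rest.length ≤ n := by simp only [List.length_cons] at hl; omega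
          simp [ih _ hle]
  exact H l.length l le_rfl

-- ===== VERDICT (by name: the statement is the Claim_ definition above) =====
theorem filter_and_join_spec : Claim_equal_filter_and_join := by
  intro tags tags_to_join _
  unfold Spec_filter_and_join
  show finishA (tags.foldl (aStep tags_to_join) ([], "", none)) = _
  rw [alt_eq_gRef]
  simpa using foldA_eq_gRef tags_to_join tags [] "" none (by simp [WInv])
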